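-- pv_equiv track=rewrite | github.com/dwyaneyao/RTV-Text-Extractor | rtv_text_extractor.py | collect_string_literals
-- ===== SOURCE A (Python) =====
-- def scan_string_literal(text: str, start_index: int, delimiter: str) -> tuple[str, int] | None:
--     i = start_index + 1
--     escaped = False
--     while i < len(text):
--         ch = text[i]
--         if escaped:
--             escaped = False
--             i += 1
--             continue
--         if ch == "\\":
--             escaped = True
--             i += 1
--             continue
--         if ch == delimiter:
--             return text[start_index + 1 : i], i + 1
--         i += 1
--     return None
--
-- def collect_string_literals(block: str) -> list[str]:
--     literals: list[str] = []
--     i = 0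
--     while i < len(block):
--         ch = block[i]
--         if ch not in ("'", '"'):
--             i += 1
--             continue
--         parsed = scan_string_literal(block, i, ch)
--         if not parsed:
--             i += 1
--             continue
--         literal, end_index = parsed
--         literals.append(literal)
--         i = end_index
--     return literals
-- ===== SOURCE B (Python) =====
-- def collect_string_literals(block: str) -> list[str]:
--     n = len(block)
--     # unesc[j]: the backslash run immediately before j has even length
--     unesc = []
--     run = 0
--     for c in block:
--         unesc.append(run % 2 == 0)
--         run = run + 1 if c == "\\" else 0
--     # nxt[d][j]: smallest k >= j with block[k] == d and unesc[k], else n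
--     nxt = {}
--     for d in ("'", '"'):
--         arr = [n] * (n + 1)
--         for j in range(n - 1, -1, -1):
--             arr[j] = j if (block[j] == d and unesc[j]) else arr[j + 1]
--         nxt[d] = arr
--     literals = []
--     i = 0
--     while i < n:
--         c = block[i]
--         if c in ("'", '"'):
--             j = nxt[c][i + 1]
--             if j < n:
--                 literals.append(block[i + 1:j])
--                 i = j + 1
--                 continue
--         i += 1
--     return literals
-- ===== Notes on version B (the rewrite author's own statement) =====
-- stated objective: alternative
-- what changed: Instead of re-scanning forward from every quote character with an escape flag, B precomputes a per-character escape-parity list and a next-unescaped-quote jump table per delimiter, then emits all literals in one indexed pass with table lookups.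
import Mathlib
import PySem

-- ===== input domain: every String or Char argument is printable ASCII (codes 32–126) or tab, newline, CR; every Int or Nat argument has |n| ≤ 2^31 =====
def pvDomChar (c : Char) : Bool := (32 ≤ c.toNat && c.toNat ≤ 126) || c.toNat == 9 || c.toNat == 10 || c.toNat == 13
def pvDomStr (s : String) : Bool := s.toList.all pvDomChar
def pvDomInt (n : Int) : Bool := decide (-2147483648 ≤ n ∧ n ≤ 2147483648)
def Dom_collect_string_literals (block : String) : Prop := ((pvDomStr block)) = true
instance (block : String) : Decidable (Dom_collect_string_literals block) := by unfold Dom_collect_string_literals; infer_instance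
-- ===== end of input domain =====

-- B replaces A's per-quote forward rescans by a precomputed escape-parity list and
-- next-unescaped-quote jump tables, then emits all literals in one indexed pass.

-- ===== PORT A =====
-- scan_string_literal's while loop; fuel (≥ text.length - i at every call) is only a
-- structural-termination guard: with fuel 0 we have i ≥ text.length, Python's loop exit.
-- The slice text[start+1:i] is (drop (start+1)).take (i-(start+1)), exact for these
-- nonnegative in-order indices.
def scanAux (text : List Char) (start : Nat) (fuel i : Nat) (escaped : Bool)
    (delim : Char) : Option (List Char × Nat) :=
  match fuel with
  | 0 => none
  | fuel + 1 =>
    if _h : i < text.length then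
      let ch := text[i]
      if escaped then scanAux text start fuel (i+1) false delim
      else if ch = '\\' then scanAux text start fuel (i+1) true delim
      else if ch = delim then some ((text.drop (start+1)).take (i - (start+1)), i+1)
      else scanAux text start fuel (i+1) escaped delim
    else none

-- collect_string_literals' while loop (fuel is the same totality guard)
def collectAux (block : List Char) (fuel i : Nat) : List String :=
  match fuel with
  | 0 => []
  | fuel + 1 =>
    if _h : i < block.length then
      let ch := block[i]
      if ch = '\'' ∨ ch = '"' then
        match scanAux block i block.length (i+1) false ch with
        | some (lit, e) => String.ofList lit :: collectAux block fuel e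
        | none => collectAux block fuel (i+1)
      else collectAux block fuel (i+1)
    else []

def collect_string_literals (block : String) : List String :=
  collectAux block.toList block.toList.length 0

-- ===== PORT B =====
-- unesc[j]: the backslash run immediately before j has even length
def unescAux (run : Nat) (cs : List Char) : List Bool :=
  match cs with
  | [] => []
  | c :: rest => (run % 2 == 0) :: unescAux (if c = '\\' then run + 1 else 0) rest

-- the backward fill arr[j] = j if effective quote at j else arr[j+1], sentinel arr[n] = n
-- (built tail-first, exactly how the Python fills the array from the right)
def nxtBuild (d : Char) (n j : Nat) (l : List (Char × Bool)) : List Nat :=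
  match l with
  | [] => [n]
  | (c, u) :: rest =>
    let tail := nxtBuild d n (j+1) rest
    (if c = d ∧ u = true then j else tail.headD n) :: tail

-- the final emitting loop; fuel is the same totality guard as in port A
def collectBAux (cs : List Char) (n : Nat) (nq nd : List Nat) (fuel i : Nat) :
    List String :=
  match fuel with
  | 0 => []
  | fuel + 1 =>
    if i < n then
      let c := cs.getD i ' '
      if c = '\'' ∨ c = '"' then
        let j := (if c = '\'' then nq else nd).getD (i+1) n
        if j < n then
          String.ofList ((cs.drop (i+1)).take (j - (i+1))) ::
            collectBAux cs n nq nd fuel (j+1)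
        else collectBAux cs n nq nd fuel (i+1)
      else collectBAux cs n nq nd fuel (i+1)
    else []

def collect_string_literals_alt (block : String) : List String :=
  let cs := block.toList
  let n := cs.length
  let un := unescAux 0 cs
  let nq := nxtBuild '\'' n 0 (cs.zip un)
  let nd := nxtBuild '"' n 0 (cs.zip un)
  collectBAux cs n nq nd n 0

-- ===== PRECONDITION & SPEC =====
def Spec_collect_string_literals (block : String) (out : List String) : Prop := out = collect_string_literals_alt block
instance (block : String) (out : List String) : Decidable (Spec_collect_string_literals block out) := by unfold Spec_collect_string_literals; infer_instance

-- ===== CLAIM (what is proved, stated in full; the proofs are below) =====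
def Claim_equal_collect_string_literals : Prop := ∀ (block : String), Dom_collect_string_literals block → Spec_collect_string_literals block (collect_string_literals block)

-- ===== LEMMAS AND PROOFS =====

-- global backslash-run length ending just before position i
def runAt (cs : List Char) : Nat → Nat
  | 0 => 0
  | i+1 => if cs.getD i ' ' = '\\' then runAt cs i + 1 else 0

-- run with an arbitrary starting value (for the unescAux induction)
def rAt (r : Nat) (cs : List Char) : Nat → Nat
  | 0 => r
  | i+1 => if cs.getD i ' ' = '\\' then rAt r cs i + 1 else 0

theorem rAt_shift (c : Char) (rest : List Char) (r : Nat) :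
    ∀ i, rAt r (c :: rest) (i+1) = rAt (if c = '\\' then r + 1 else 0) rest i := by
  intro i
  induction i with
  | zero => simp [rAt]
  | succ k ih =>
    have hL : rAt r (c :: rest) (k+2) =
        if (c :: rest).getD (k+1) ' ' = '\\' then rAt r (c :: rest) (k+1) + 1 else 0 := rfl
    rw [hL, List.getD_cons_succ, ih]
    rfl

theorem runAt_eq_rAt (cs : List Char) (i : Nat) : runAt cs i = rAt 0 cs i := by
  induction i with
  | zero => rfl
  | succ k ih => simp only [runAt, rAt, ih]

theorem unescAux_length (r : Nat) (cs : List Char) : (unescAux r cs).length = cs.length := by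
  induction cs generalizing r with
  | nil => rfl
  | cons c rest ih => simp [unescAux, ih]

theorem unesc_getD (cs : List Char) : ∀ (r i : Nat), i < cs.length →
    (unescAux r cs).getD i false = (rAt r cs i % 2 == 0) := by
  induction cs with
  | nil => intro r i h; simp at h
  | cons c rest ih =>
    intro r i h
    cases i with
    | zero => simp [unescAux, rAt]
    | succ k =>
      simp only [unescAux, List.getD_cons_succ, rAt_shift]
      exact ih _ k (by simpa using h)

theorem nxtBuild_ne_nil (d : Char) (n j : Nat) (l : List (Char × Bool)) :
    nxtBuild d n j l ≠ [] := by
  cases l with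
  | nil => simp [nxtBuild]
  | cons p rest => obtain ⟨c, u⟩ := p; simp [nxtBuild]

theorem nxtBuild_headD (d : Char) (n j : Nat) (l : List (Char × Bool)) :
    (nxtBuild d n j l).headD n = (nxtBuild d n j l).getD 0 n := by
  cases h : nxtBuild d n j l with
  | nil => exact absurd h (nxtBuild_ne_nil d n j l)
  | cons a l' => simp

theorem nxtBuild_ge (d : Char) (n : Nat) : ∀ (l : List (Char × Bool)) (j t : Nat),
    j + t ≤ (nxtBuild d n j l).getD t n ∨ (nxtBuild d n j l).getD t n = n := by
  intro l
  induction l with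
  | nil => intro j t; right; cases t <;> simp [nxtBuild]
  | cons p rest ih =>
    intro j t
    obtain ⟨c, u⟩ := p
    cases t with
    | succ t' =>
      have := ih (j+1) t'
      simp only [nxtBuild, List.getD_cons_succ] at *
      omega
    | zero =>
      simp only [nxtBuild, List.getD_cons_zero]
      split
      · left; omega
      · have h0 := ih (j+1) 0
        rw [nxtBuild_headD]
        omega

theorem nxtBuild_shift (d : Char) (n : Nat) :
    ∀ (t : Nat) (l : List (Char × Bool)) (j : Nat),
      (nxtBuild d n j l).getD t n = (nxtBuild d n (j+t) (l.drop t)).getD 0 n := by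
  intro t
  induction t with
  | zero => intro l j; simp
  | succ k ih =>
    intro l j
    cases l with
    | nil => simp [nxtBuild]
    | cons p rest =>
      obtain ⟨c, u⟩ := p
      simp only [nxtBuild, List.getD_cons_succ, List.drop_succ_cons, ih rest (j+1)]
      have hjk : j + 1 + k = j + (k + 1) := by omega
      rw [hjk]

-- the absolute-index tables used by collect_string_literals_alt
def arrD (cs : List Char) (d : Char) : List Nat :=
  nxtBuild d cs.length 0 (cs.zip (unescAux 0 cs))

theorem zipLen (cs : List Char) : (cs.zip (unescAux 0 cs)).length = cs.length := by
  simp [unescAux_length]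

theorem arrD_out (cs : List Char) (d : Char) (i : Nat) (h : cs.length ≤ i) :
    (arrD cs d).getD i cs.length = cs.length := by
  rw [arrD, nxtBuild_shift]
  rw [List.drop_of_length_le (by rw [zipLen]; exact h)]
  simp [nxtBuild]

theorem arrD_rec (cs : List Char) (d : Char) (i : Nat) (h : i < cs.length) :
    (arrD cs d).getD i cs.length =
      if cs.getD i ' ' = d ∧ (unescAux 0 cs).getD i false = true then i
      else (arrD cs d).getD (i+1) cs.length := by
  have hz : i < (cs.zip (unescAux 0 cs)).length := by rw [zipLen]; exact h
  have hu : i < (unescAux 0 cs).length := by rw [unescAux_length]; exact h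
  have hshift : (arrD cs d).getD (i+1) cs.length =
      (nxtBuild d cs.length (i+1) ((cs.zip (unescAux 0 cs)).drop (i+1))).getD 0 cs.length := by
    rw [arrD, nxtBuild_shift]
    simp
  rw [arrD, nxtBuild_shift, List.drop_eq_getElem_cons hz]
  have hget : (cs.zip (unescAux 0 cs))[i] = (cs[i], (unescAux 0 cs)[i]'hu) := by
    simp [List.getElem_zip]
  rw [hget]
  simp only [nxtBuild, List.getD_cons_zero, nxtBuild_headD, Nat.zero_add]
  rw [List.getD_eq_getElem cs ' ' h, List.getD_eq_getElem _ false hu, ← hshift]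
  rw [arrD]

theorem arrD_ge (cs : List Char) (d : Char) (i : Nat)
    (h : (arrD cs d).getD i cs.length < cs.length) :
    i ≤ (arrD cs d).getD i cs.length := by
  have h2 := nxtBuild_ge d cs.length (cs.zip (unescAux 0 cs)) 0 i
  rw [arrD] at h ⊢
  rcases h2 with h2 | h2 <;> omega

-- scanAux computes exactly the jump-table lookup
theorem scan_nxt (cs : List Char) (d : Char) (hd : d ≠ '\\') :
    ∀ (fuel i start : Nat) (esc : Bool), cs.length - i ≤ fuel →
      esc = (runAt cs i % 2 == 1) →
      scanAux cs start fuel i esc d =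
        (if (arrD cs d).getD i cs.length < cs.length then
          some ((cs.drop (start+1)).take ((arrD cs d).getD i cs.length - (start+1)),
                (arrD cs d).getD i cs.length + 1)
        else none) := by
  intro fuel
  induction fuel with
  | zero =>
    intro i start esc hf hesc
    rw [arrD_out cs d i (by omega)]
    simp [scanAux]
  | succ fuel ih =>
    intro i start esc hf hesc
    have hstep : scanAux cs start (fuel+1) i esc d =
        (if _h : i < cs.length then
          (if esc then scanAux cs start fuel (i+1) false d
           else if cs[i] = '\\' then scanAux cs start fuel (i+1) true d
           else if cs[i] = d then some ((cs.drop (start+1)).take (i - (start+1)), i+1)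
           else scanAux cs start fuel (i+1) esc d)
        else none) := rfl
    by_cases h : i < cs.length
    · have hgetD : cs.getD i ' ' = cs[i] := List.getD_eq_getElem cs ' ' h
      rw [hstep, dif_pos h, arrD_rec cs d i h]
      cases esc with
      | true =>
        -- escaped: skip this char
        have hrun : runAt cs i % 2 = 1 := by
          by_contra hc
          have : runAt cs i % 2 = 0 := by omega
          simp [this] at hesc
        have hnext : runAt cs (i+1) % 2 = 0 := by
          simp only [runAt]
          split <;> omega
        have hno : ¬ (cs.getD i ' ' = d ∧ (unescAux 0 cs).getD i false = true) := by
          rintro ⟨-, hu⟩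
          rw [unesc_getD cs 0 i h, ← runAt_eq_rAt] at hu
          simp [hrun] at hu
        rw [if_neg hno, if_pos rfl]
        exact ih (i+1) start false (by omega) (by simp [hnext])
      | false =>
        have hrun : runAt cs i % 2 = 0 := by
          by_contra hc
          have : runAt cs i % 2 = 1 := by omega
          simp [this] at hesc
        rw [if_neg (by simp : ¬ (false = true))]
        by_cases hbs : cs[i] = '\\'
        · -- unescaped backslash: next char escaped
          have hnext : runAt cs (i+1) % 2 = 1 := by
            simp only [runAt]
            rw [hgetD, hbs]
            simp
            omega
          have hno : ¬ (cs.getD i ' ' = d ∧ (unescAux 0 cs).getD i false = true) := by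
            rintro ⟨he, -⟩
            rw [hgetD, hbs] at he
            exact hd he.symm
          rw [if_neg hno, if_pos hbs]
          exact ih (i+1) start true (by omega) (by simp [hnext])
        · by_cases hdq : cs[i] = d
          · -- unescaped delimiter: close the literal here
            have h1 : cs.getD i ' ' = d := by rw [hgetD]; exact hdq
            have h2 : (unescAux 0 cs).getD i false = true := by
              rw [unesc_getD cs 0 i h, ← runAt_eq_rAt, hrun]
              simp
            have hand : cs.getD i ' ' = d ∧ (unescAux 0 cs).getD i false = true := ⟨h1, h2⟩
            rw [if_pos hand, if_neg hbs, if_pos hdq, if_pos h]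
          · -- ordinary char
            have hnext : runAt cs (i+1) = 0 := by
              simp only [runAt]
              rw [hgetD]
              simp [hbs]
            have hno : ¬ (cs.getD i ' ' = d ∧ (unescAux 0 cs).getD i false = true) := by
              rintro ⟨he, -⟩
              rw [hgetD] at he
              exact hdq he
            rw [if_neg hno, if_neg hbs, if_neg hdq]
            exact ih (i+1) start false (by omega) (by simp [hnext])
    · rw [hstep, dif_neg h, arrD_out cs d i (by omega)]
      simp

-- both emitting loops agree, step for step
theorem collect_eq (cs : List Char) :
    ∀ (fuel i : Nat), cs.length - i ≤ fuel →
      collectAux cs fuel i =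
        collectBAux cs cs.length (arrD cs '\'') (arrD cs '"') fuel i := by
  intro fuel
  induction fuel with
  | zero => intro i hf; rfl
  | succ fuel ih =>
    intro i hf
    by_cases h : i < cs.length
    · have hgetD : cs.getD i ' ' = cs[i] := List.getD_eq_getElem cs ' ' h
      by_cases hq : cs[i] = '\'' ∨ cs[i] = '"'
      · -- a quote: A scans forward, B looks the closing position up in the table
        have hd : cs[i] ≠ '\\' := by rcases hq with hq | hq <;> simp [hq]
        have hrun : (false : Bool) = (runAt cs (i+1) % 2 == 1) := by
          have : runAt cs (i+1) = 0 := by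
            simp only [runAt]
            rw [hgetD]
            simp [hd]
          simp [this]
        have hscan := scan_nxt cs cs[i] hd cs.length (i+1) i false (by omega) hrun
        have hsel : (if cs[i] = '\'' then arrD cs '\'' else arrD cs '"') = arrD cs cs[i] := by
          rcases hq with hq | hq
          · rw [if_pos hq, ← hq]
          · have hne : ¬ cs[i] = '\'' := by rw [hq]; decide
            rw [if_neg hne, ← hq]
        have hA : collectAux cs (fuel+1) i =
            (match scanAux cs i cs.length (i+1) false cs[i] with
             | some (lit, e) => String.ofList lit :: collectAux cs fuel e
             | none => collectAux cs fuel (i+1)) := by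
          show (if _h : i < cs.length then _ else _) = _
          rw [dif_pos h]
          simp only [hq, if_pos]
        have hB : collectBAux cs cs.length (arrD cs '\'') (arrD cs '"') (fuel+1) i =
            (if (arrD cs cs[i]).getD (i+1) cs.length < cs.length then
              String.ofList ((cs.drop (i+1)).take ((arrD cs cs[i]).getD (i+1) cs.length - (i+1))) ::
                collectBAux cs cs.length (arrD cs '\'') (arrD cs '"') fuel
                  ((arrD cs cs[i]).getD (i+1) cs.length + 1)
            else collectBAux cs cs.length (arrD cs '\'') (arrD cs '"') fuel (i+1)) := by
          show (if i < cs.length then _ else _) = _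
          rw [if_pos h]
          simp only [hgetD, hq, if_pos, hsel]
        rw [hA, hB]
        set j := (arrD cs cs[i]).getD (i+1) cs.length with hj
        by_cases hjn : j < cs.length
        · have hji : i + 1 ≤ j := arrD_ge cs cs[i] (i+1) (by rw [← hj]; exact hjn)
          rw [hscan]
          simp only [hjn, if_true]
          rw [ih (j+1) (by omega)]
        · rw [hscan]
          simp only [hjn, if_false]
          exact ih (i+1) (by omega)
      · -- not a quote: both step to i+1
        have hA : collectAux cs (fuel+1) i = collectAux cs fuel (i+1) := by
          show (if _h : i < cs.length then _ else _) = _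
          rw [dif_pos h]
          simp only [hq, if_false]
        have hB : collectBAux cs cs.length (arrD cs '\'') (arrD cs '"') (fuel+1) i =
            collectBAux cs cs.length (arrD cs '\'') (arrD cs '"') fuel (i+1) := by
          have hq' : ¬ (cs.getD i ' ' = '\'' ∨ cs.getD i ' ' = '"') := by
            rw [hgetD]; exact hq
          show (if i < cs.length then _ else _) = _
          rw [if_pos h]
          simp only [hq', if_false]
        rw [hA, hB]
        exact ih (i+1) (by omega)
    · show (if _h : i < cs.length then _ else _) = (if i < cs.length then _ else _)
      rw [dif_neg h, if_neg h]

-- ===== VERDICT (by name: the statement is the Claim_ definition above) =====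
theorem collect_string_literals_spec : Claim_equal_collect_string_literals := by
  intro block _
  unfold Spec_collect_string_literals collect_string_literals collect_string_literals_alt
  exact collect_eq block.toList block.toList.length 0 (by omega)
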